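-- pv_equiv track=rewrite | github.com/KScaesar/algo-practice | Binary_Search/00034._Find_First_and_Last_Position_of_Element_in_Sorted_Array.py | find_lte
-- ===== SOURCE A (Python) =====
-- from typing import List
--
-- def find_lte(nums: List[int], target: int) -> int:
--     """尋找最後一個 <= target 的元素索引"""
--     size = len(nums)
--     lo = 0
--     hi = size - 1
--
--     # 當陣列中所有元素都 > target 時，代表不存在 <= target 的元素。
--     # 邏輯上，這個「不存在的位置」應落在陣列的「最左邊界外」(index 0 之前)。
--     # 預設回傳 -1，這也與「last <= target」等於「upper_bound - 1」在找不到時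
--     # (upper_bound 傳回 0) 算出 0 - 1 = -1 的結果完美吻合，不需要做任何修改。
--     ans = -1
--
--     while lo <= hi:
--         mid = lo + (hi - lo) // 2
--         if nums[mid] <= target:
--             ans = mid
--             lo = mid + 1  # [mid+1, hi] 如果是相等的情況, 會往 high 靠近
--         else:
--             hi = mid - 1  # [lo, mid-1]
--
--     # 判斷 target 是否相等是 Caller (呼叫者) 自己要關心的事，Callee (底層工具) 不該處理
--     # return ans if nums[ans] == target else -1
--     return ans
-- ===== SOURCE B (Python) =====
-- def find_lte(nums, target):
--     """尋找最後一個 <= target 的元素索引 — recursion over (start, window-length) in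
--     natural numbers, helper returns Optional[int] (None = not found) instead of the -1 sentinel."""
--     def go(lo, n):
--         if n == 0:
--             return None
--         k = (n - 1) // 2
--         mid = lo + k
--         if nums[mid] <= target:
--             r = go(mid + 1, n - 1 - k)
--             return mid if r is None else r
--         return go(lo, k)
--     r = go(0, len(nums))
--     return -1 if r is None else r
-- ===== Notes on version B (the rewrite author's own statement) =====
-- stated objective: alternative
-- what changed: Replaces the iterative while-loop over signed (lo, hi, ans) state with a recursion over (start, window-length) natural numbers whose helper returns Optional[int] (None = not found) instead of threading the -1 sentinel accumulator; it probes the identical indices.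
import Mathlib
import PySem

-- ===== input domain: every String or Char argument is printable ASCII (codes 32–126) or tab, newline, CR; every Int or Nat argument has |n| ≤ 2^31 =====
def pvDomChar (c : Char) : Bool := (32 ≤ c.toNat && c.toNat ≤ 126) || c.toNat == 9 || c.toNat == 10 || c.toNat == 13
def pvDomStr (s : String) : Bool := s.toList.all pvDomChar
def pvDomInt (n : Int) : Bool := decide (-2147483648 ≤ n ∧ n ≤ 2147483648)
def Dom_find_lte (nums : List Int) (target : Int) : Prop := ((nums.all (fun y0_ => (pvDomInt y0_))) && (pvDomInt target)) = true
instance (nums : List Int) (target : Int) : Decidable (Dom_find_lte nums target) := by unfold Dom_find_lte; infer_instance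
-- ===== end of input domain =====

-- B replaces A's iterative while-loop over signed (lo, hi, ans) state with a recursion over
-- (start, window-length) naturals whose helper returns Option instead of a -1 sentinel (alternative; same cost).

-- ===== PORT A =====
-- A's while-loop over state (lo, hi, ans).  nums[mid] is ported via pyGetD; on every call
-- reachable from find_lte the index satisfies 0 ≤ lo ≤ mid ≤ hi < nums.length whenever the
-- branch is taken, so the default 0 is never used and the port is exact.
def find_lte_loop (nums : List Int) (target lo hi ans : Int) : Int :=
  if lo ≤ hi then
    let mid := lo + PySem.Int.floordiv (hi - lo) 2
    if PySem.List.pyGetD nums mid 0 ≤ target then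
      find_lte_loop nums target (mid + 1) hi mid
    else
      find_lte_loop nums target lo (mid - 1) ans
  else ans
termination_by (hi + 1 - lo).toNat
decreasing_by
  all_goals
    simp only [PySem.Int.floordiv_eq_ediv_of_pos (by omega : (0:Int) < 2)]
    omega

def find_lte (nums : List Int) (target : Int) : Int :=
  find_lte_loop nums target 0 ((nums.length : Int) - 1) (-1)

-- ===== PORT B =====
-- go over the window of n elements starting at lo; returns none when the window is empty.
-- nums[mid] is ported as List.getD (index always in range on calls reachable from find_lte_alt).
def find_lte_go (nums : List Int) (target : Int) (lo n : Nat) : Option Nat :=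
  if n = 0 then none
  else
    let k := (n - 1) / 2
    let mid := lo + k
    if nums.getD mid 0 ≤ target then
      match find_lte_go nums target (mid + 1) (n - 1 - k) with
      | none => some mid
      | some r => some r
    else
      find_lte_go nums target lo k
termination_by n
decreasing_by all_goals omega

def find_lte_alt (nums : List Int) (target : Int) : Int :=
  match find_lte_go nums target 0 nums.length with
  | none => -1
  | some r => (r : Int)

-- ===== PRECONDITION & SPEC =====
def Spec_find_lte (nums : List Int) (target : Int) (out : Int) : Prop := out = find_lte_alt nums target
instance (nums : List Int) (target : Int) (out : Int) : Decidable (Spec_find_lte nums target out) := by unfold Spec_find_lte; infer_instance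

-- ===== CLAIM (what is proved, stated in full; the proofs are below) =====
def Claim_equal_find_lte : Prop := ∀ (nums : List Int) (target : Int), Dom_find_lte nums target → Spec_find_lte nums target (find_lte nums target)

-- ===== LEMMAS AND PROOFS =====

-- Correspondence: the loop on the integer window [lo, hi] with accumulator 'ans' equals the
-- natural-number window recursion (start lo, length N = hi+1-lo), with none read back as 'ans'.
theorem find_lte_loop_eq_go (nums : List Int) (target : Int) :
    ∀ (N : Nat) (lo : Nat) (hi ans : Int), hi + 1 - lo = (N : Int) →
    find_lte_loop nums target lo hi ans =
      (match find_lte_go nums target lo N with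
       | none => ans
       | some r => (r : Int)) := by
  intro N
  induction N using Nat.strong_induction_on with
  | _ N ih =>
    intro lo hi ans hN
    rw [find_lte_loop, find_lte_go]
    by_cases h0 : N = 0
    · subst h0
      rw [if_neg (by omega), if_pos rfl]
    · have hle : (lo : Int) ≤ hi := by omega
      rw [if_pos hle, if_neg h0]
      have hfd : PySem.Int.floordiv (hi - (lo : Int)) 2 = ((N - 1) / 2 : Nat) := by
        have : hi - (lo : Int) = ((N - 1 : Nat) : Int) := by omega
        rw [this]
        exact_mod_cast PySem.Int.floordiv_natCast (N - 1) 2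
      set k := (N - 1) / 2 with hk
      have hmid : (lo : Int) + PySem.Int.floordiv (hi - (lo : Int)) 2 = ((lo + k : Nat) : Int) := by
        rw [hfd]; push_cast; ring
      simp only [hmid]
      have hget : PySem.List.pyGetD nums ((lo + k : Nat) : Int) 0 = nums.getD (lo + k) 0 :=
        PySem.List.pyGetD_natCast nums (lo + k) 0
      rw [hget]
      by_cases hc : nums.getD (lo + k) 0 ≤ target
      · rw [if_pos hc, if_pos hc]
        have hk1 : k ≤ N - 1 := by omega
        have hcast : ((lo + k : Nat) : Int) + 1 = ((lo + k + 1 : Nat) : Int) := by push_cast; ring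
        rw [hcast, ih (N - 1 - k) (by omega) (lo + k + 1) hi ((lo + k : Nat) : Int) (by push_cast; omega)]
        cases find_lte_go nums target (lo + k + 1) (N - 1 - k) <;> simp
      · rw [if_neg hc, if_neg hc]
        have : ((lo + k : Nat) : Int) - 1 + 1 - (lo : Nat) = (k : Int) := by push_cast; ring
        rw [ih k (by omega) lo (((lo + k : Nat) : Int) - 1) ans (by push_cast; ring)]

-- ===== VERDICT (by name: the statement is the Claim_ definition above) =====
theorem find_lte_spec : Claim_equal_find_lte := by
  intro nums target _
  unfold Spec_find_lte find_lte find_lte_alt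
  have h := find_lte_loop_eq_go nums target nums.length 0 ((nums.length : Int) - 1) (-1) (by push_cast; ring)
  rw [Nat.cast_zero] at h
  rw [h]
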